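-- pv_equiv track=rewrite | github.com/Md-Merazul-Islam/Codeforces-1000-problems-Solving | A_Turtle_Puzzle_Rearrange_and_Negate.py | cnp
-- ===== SOURCE A (Python) =====
-- def cnp(fr, scnd, mns):
--     ln = len(fr)
--     cur = fr[0]
--     nmp = 1
--
--     for i in range(1, ln):
--         if fr[i] >= scnd[i - 1]:
--             an = cur + scnd[i - 1:]
--             if an == mns:
--                 nmp += 1
--         cur += fr[i]
--
--     cur += scnd[ln - 1]
--     if cur == mns:
--         nmp += 1
--
--     return nmp
-- ===== SOURCE B (Python) =====
-- def cnp(fr, scnd, mns):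
--     # Precompute the longest common prefix of fr/mns and the longest common
--     # suffix of scnd/mns once; each candidate concatenation is then tested in O(1).
--     ln = len(fr)
--     ls = len(scnd)
--     lm = len(mns)
--     p = 0
--     for x, y in zip(fr, mns):
--         if x != y:
--             break
--         p += 1
--     s = 0
--     for x, y in zip(reversed(scnd), reversed(mns)):
--         if x != y:
--             break
--         s += 1
--     count = 1
--     if lm == ls + 1:
--         for i in range(1, ln):
--             if fr[i] >= scnd[i - 1] and i <= p and ls - i + 1 <= s:
--                 count += 1
--     if lm == ln + 1 and ln <= p and mns[ln] == scnd[ln - 1]: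
--         count += 1
--     return count
-- ===== Notes on version B (the rewrite author's own statement) =====
-- stated objective: faster
-- what changed: Instead of rebuilding the concatenation fr[:i]+scnd[i-1:] and comparing the whole string at every i (O(n) per i), B precomputes once the longest common prefix of fr with mns and the longest common suffix of scnd with mns, after which each candidate index is tested with O(1) integer comparisons.
import Mathlib
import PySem

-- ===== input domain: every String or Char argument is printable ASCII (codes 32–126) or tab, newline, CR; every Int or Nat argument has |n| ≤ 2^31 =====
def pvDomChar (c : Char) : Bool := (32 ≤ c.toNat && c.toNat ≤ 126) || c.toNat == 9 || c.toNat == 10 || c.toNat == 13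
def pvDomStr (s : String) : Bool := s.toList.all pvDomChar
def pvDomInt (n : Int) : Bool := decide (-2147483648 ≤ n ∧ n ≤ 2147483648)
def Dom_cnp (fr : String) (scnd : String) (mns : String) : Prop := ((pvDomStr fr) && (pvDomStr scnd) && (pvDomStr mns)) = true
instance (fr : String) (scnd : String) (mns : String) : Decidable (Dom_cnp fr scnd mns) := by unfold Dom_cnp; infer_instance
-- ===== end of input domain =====

-- B replaces A's per-index string rebuild+compare by one precomputed longest
-- common prefix/suffix against mns, giving O(1) tests per index.


-- ===== PORT A =====
-- A-side helper: the body of A's 'for i in range(1, ln)' loop; state = (cur, nmp)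
def stepA (f sc m : List Char) (st : List Char × Int) (i : Int) : List Char × Int :=
  let nmp :=
    if PySem.List.pyGetD f i ' ' ≥ PySem.List.pyGetD sc (i - 1) ' ' then
      if st.1 ++ PySem.List.slice sc (some (i - 1)) none = m then st.2 + 1 else st.2
    else st.2
  (st.1 ++ [PySem.List.pyGetD f i ' '], nmp)

-- literal transliteration of A
def cnp (fr : String) (scnd : String) (mns : String) : Int :=
  let f := fr.toList
  let sc := scnd.toList
  let m := mns.toList
  let ln : Int := f.length
  let st := (PySem.List.pyRange 1 ln 1).foldl (stepA f sc m) ([PySem.List.pyGetD f 0 ' '], 1)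
  let cur := st.1 ++ [PySem.List.pyGetD sc (ln - 1) ' ']
  if cur = m then st.2 + 1 else st.2

-- ===== PORT B =====
-- B-side helper: length of the longest common prefix of two zipped strings
-- (Source B's 'for x, y in zip(…): if x != y: break; p += 1' loop)
def lcpLen : List (Char × Char) → Nat
  | [] => 0
  | (x, y) :: rest => if x ≠ y then 0 else lcpLen rest + 1

-- B-side helper: the compound O(1) test of Source B's counting loop
def condB (f sc : List Char) (p s ls : Nat) (i : Int) : Bool :=
  decide (PySem.List.pyGetD f i ' ' ≥ PySem.List.pyGetD sc (i - 1) ' ') &&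
  decide (i ≤ (p : Int)) && decide ((ls : Int) - i + 1 ≤ (s : Int))

def cnp_alt (fr : String) (scnd : String) (mns : String) : Int :=
  let f := fr.toList
  let sc := scnd.toList
  let m := mns.toList
  let ln := f.length
  let ls := sc.length
  let lm := m.length
  let p := lcpLen (f.zip m)
  let s := lcpLen (sc.reverse.zip m.reverse)
  let count : Int :=
    if lm = ls + 1 then
      (PySem.List.pyRange 1 ln 1).foldl
        (fun (c : Int) i => if condB f sc p s ls i then c + 1 else c) 1
    else 1
  if lm = ln + 1 ∧ ln ≤ p ∧ PySem.List.pyGetD m (ln : Int) ' ' = PySem.List.pyGetD sc ((ln : Int) - 1) ' '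
  then count + 1 else count

-- ===== PRECONDITION & SPEC =====
-- Pre excludes exactly the inputs on which A raises IndexError: fr = '' (fr[0])
-- and len(scnd) < len(fr) (scnd[ln-1]).
def Pre_cnp (fr : String) (scnd : String) (mns : String) : Prop :=
  fr.toList ≠ [] ∧ fr.toList.length ≤ scnd.toList.length
instance (fr : String) (scnd : String) (mns : String) : Decidable (Pre_cnp fr scnd mns) := by
  unfold Pre_cnp; infer_instance

def pvWitness_cnp : String × String × String := ("ab", "ba", "aba")

def Spec_cnp (fr : String) (scnd : String) (mns : String) (out : Int) : Prop := out = cnp_alt fr scnd mns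
instance (fr : String) (scnd : String) (mns : String) (out : Int) : Decidable (Spec_cnp fr scnd mns out) := by unfold Spec_cnp; infer_instance

-- ===== CLAIM (what is proved, stated in full; the proofs are below) =====
def Claim_equal_cnp : Prop := ∀ (fr : String) (scnd : String) (mns : String), Dom_cnp fr scnd mns → Pre_cnp fr scnd mns → Spec_cnp fr scnd mns (cnp fr scnd mns)

-- ===== LEMMAS AND PROOFS =====

-- the condition A's loop tests at index i, stated on the input lists
def condA (f sc m : List Char) (i : Int) : Bool :=
  decide (PySem.List.pyGetD f i ' ' ≥ PySem.List.pyGetD sc (i - 1) ' ') &&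
  decide (f.take i.toNat ++ sc.drop (i - 1).toNat = m)

-- 'a ++ b = m' splits into a prefix and a suffix condition
theorem append_eq_iff_take_drop (a b m : List Char) :
    a ++ b = m ↔ a = m.take a.length ∧ b = m.drop a.length := by
  constructor
  · rintro rfl; simp
  · rintro ⟨h1, h2⟩
    conv_lhs => rw [h1, h2]
    exact List.take_append_drop _ _

-- equal takes ↔ bounded by the longest common prefix
theorem lcp_take_iff (a b : List Char) (i : Nat) (ha : i ≤ a.length) (hb : i ≤ b.length) :
    a.take i = b.take i ↔ i ≤ lcpLen (a.zip b) := by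
  induction a generalizing b i with
  | nil => simp at ha; subst ha; simp
  | cons x a ih =>
    cases b with
    | nil => simp at hb; subst hb; simp
    | cons y b =>
      cases i with
      | zero => simp
      | succ i =>
        simp only [List.take_succ_cons, List.zip_cons_cons, lcpLen]
        by_cases hxy : x = y
        · subst hxy
          rw [if_neg (by simp)]
          simp only [List.cons.injEq, true_and]
          rw [ih b i (by simpa using ha) (by simpa using hb)]
          omega
        · simp [hxy]

-- equal drops ↔ equal suffix lengths bounded by the longest common suffix
theorem lcs_drop_iff (a b : List Char) (j k : Nat) (hj : j ≤ a.length) (hk : k ≤ b.length) :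
    a.drop j = b.drop k ↔
      a.length - j = b.length - k ∧ a.length - j ≤ lcpLen (a.reverse.zip b.reverse) := by
  constructor
  · intro h
    have hlen : a.length - j = b.length - k := by
      have := congrArg List.length h; simpa using this
    refine ⟨hlen, ?_⟩
    have hrev : a.reverse.take (a.length - j) = b.reverse.take (b.length - k) := by
      rw [← List.reverse_drop, ← List.reverse_drop, h]
    rw [← lcp_take_iff a.reverse b.reverse (a.length - j) (by simp) (by simp; omega)]
    rw [hlen] at hrev ⊢
    exact hrev
  · rintro ⟨hlen, hlcp⟩
    have hrev : a.reverse.take (a.length - j) = b.reverse.take (b.length - k) := by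
      rw [hlen]
      exact (lcp_take_iff a.reverse b.reverse (b.length - k) (by simp; omega) (by simp)).mpr
        (hlen ▸ hlcp)
    have := congrArg List.reverse hrev
    rwa [← List.reverse_drop, ← List.reverse_drop, List.reverse_reverse, List.reverse_reverse] at this

-- the O(n) string test of A's loop ↔ B's O(1) comparisons (Nat form)
theorem concat_eq_iff (f sc m : List Char) (k : Nat)
    (hk1 : 1 ≤ k) (hk : k < f.length) (hle : f.length ≤ sc.length) :
    (f.take k ++ sc.drop (k - 1) = m) ↔
      (m.length = sc.length + 1 ∧ k ≤ lcpLen (f.zip m) ∧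
        sc.length - k + 1 ≤ lcpLen (sc.reverse.zip m.reverse)) := by
  have hkf : (f.take k).length = k := by simp; omega
  rw [append_eq_iff_take_drop, hkf]
  constructor
  · rintro ⟨h1, h2⟩
    have hlen : sc.length - (k - 1) = m.length - k := by
      have := congrArg List.length h2; simpa using this
    have hm : m.length = sc.length + 1 := by omega
    refine ⟨hm, (lcp_take_iff f m k (by omega) (by omega)).mp h1, ?_⟩
    have := ((lcs_drop_iff sc m (k - 1) k (by omega) (by omega)).mp h2).2
    omega
  · rintro ⟨hm, hp, hs⟩
    exact ⟨(lcp_take_iff f m k (by omega) (by omega)).mpr hp,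
      (lcs_drop_iff sc m (k - 1) k (by omega) (by omega)).mpr ⟨by omega, by omega⟩⟩

-- the final test 'fr + scnd[ln-1] == mns' ↔ B's O(1) comparisons
theorem final_eq_iff (f m : List Char) (c : Char) :
    (f ++ [c] = m) ↔
      (m.length = f.length + 1 ∧ f.length ≤ lcpLen (f.zip m) ∧ m.getD f.length ' ' = c) := by
  rw [append_eq_iff_take_drop]
  constructor
  · rintro ⟨h1, h2⟩
    have hlen : m.length - f.length = 1 := by
      have := congrArg List.length h2; simpa using this.symm
    have hfm : f.length ≤ m.length := by
      by_contra hc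
      have : m.take f.length = m := List.take_of_length_le (by omega)
      rw [this] at h1
      have := congrArg List.length h1
      omega
    have hm : m.length = f.length + 1 := by omega
    refine ⟨hm, ?_, ?_⟩
    · rw [← lcp_take_iff f m f.length le_rfl (by omega)]
      conv_lhs => rw [List.take_length, h1]
    · have : m[f.length]? = some c := by
        have := congrArg (fun l => l[0]?) h2
        simpa [List.getElem?_drop] using this.symm
      simp [List.getD_eq_getElem?_getD, this]
  · rintro ⟨hm, hp, hc⟩
    have h1 : f = m.take f.length := by
      have := (lcp_take_iff f m f.length le_rfl (by omega)).mpr hp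
      rwa [List.take_length] at this
    refine ⟨h1, ?_⟩
    have hlen : (m.drop f.length).length = 1 := by simp; omega
    obtain ⟨a, ha⟩ := List.length_eq_one_iff.mp hlen
    have hga : m[f.length]? = some a := by
      have := congrArg (fun l => l[0]?) ha
      simpa [List.getElem?_drop] using this
    have : a = c := by
      rw [List.getD_eq_getElem?_getD, hga] at hc
      simpa using hc
    rw [ha, this]

-- one step of A's loop on the invariant state (cur = fr[:j])
theorem stepA_take (f sc m : List Char) (j : Nat) (hj1 : 1 ≤ j) (hlt : j < f.length) (n : Int) :
    stepA f sc m (f.take j, n)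
      (j : Int) = (f.take (j + 1), if condA f sc m (j : Int) then n + 1 else n) := by
  unfold stepA condA
  rw [PySem.List.slice_from sc (by omega : (0:Int) ≤ (j:Int) - 1)]
  simp only [PySem.List.pyGetD_natCast, Int.toNat_natCast]
  refine Prod.ext ?_ ?_
  · show f.take j ++ [f.getD j ' '] = f.take (j + 1)
    rw [List.getD_eq_getElem f ' ' hlt]
    exact List.take_append_getElem hlt
  · simp only [Bool.and_eq_true, decide_eq_true_eq]
    split_ifs <;> tauto

-- A's loop invariant: cur = fr[:j] and nmp counts the satisfied indices
theorem loopA (f sc m : List Char) (d j : Nat) (hd : f.length - j = d)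
    (hj1 : 1 ≤ j) (hjl : j ≤ f.length) (n : Int) :
    (PySem.List.pyRange (j : Int) (f.length : Int) 1).foldl (stepA f sc m) (f.take j, n)
      = (f, n + ((PySem.List.pyRange (j : Int) (f.length : Int) 1).countP (condA f sc m) : Int)) := by
  induction d generalizing j n with
  | zero =>
    have hj : j = f.length := by omega
    subst hj
    rw [PySem.List.pyRange_one_eq_nil le_rfl]
    simp
  | succ d ih =>
    have hlt : j < f.length := by omega
    rw [PySem.List.pyRange_one_cons (by exact_mod_cast hlt)]
    simp only [List.foldl_cons, stepA_take f sc m j hj1 hlt n]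
    have hcast : ((j : Int) + 1) = ((j + 1 : Nat) : Int) := by push_cast; ring
    rw [hcast, ih (j + 1) (by omega) (by omega) (by omega)]
    rw [List.countP_cons]
    split_ifs with h <;> (refine Prod.ext rfl ?_) <;> (show _ = (_ : Int); push_cast; ring)

-- A's per-index test equals B's per-index test (when len(mns) = len(scnd)+1)
theorem condA_eq_condB (f sc m : List Char) (i : Int)
    (h1 : 1 ≤ i) (h2 : i < (f.length : Int)) (hle : f.length ≤ sc.length)
    (hm : m.length = sc.length + 1) :
    condA f sc m i
      = condB f sc (lcpLen (f.zip m)) (lcpLen (sc.reverse.zip m.reverse)) sc.length i := by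
  unfold condA condB
  rw [Bool.eq_iff_iff]
  simp only [Bool.and_eq_true, decide_eq_true_eq]
  have hnat : (i - 1).toNat = i.toNat - 1 := by omega
  rw [hnat, concat_eq_iff f sc m i.toNat (by omega) (by omega) hle]
  constructor
  · rintro ⟨hge, _, hp, hs⟩
    exact ⟨⟨hge, by omega⟩, by omega⟩
  · rintro ⟨⟨hge, hp⟩, hs⟩
    exact ⟨hge, hm, by omega, by omega⟩

-- ===== VERDICT (by name: the statement is the Claim_ definition above) =====
theorem cnp_spec : Claim_equal_cnp := by
  intro fr scnd mns _ hpre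
  unfold Spec_cnp
  simp only [cnp, cnp_alt]
  obtain ⟨hne, hle⟩ := hpre
  generalize mns.toList = m at *
  generalize scnd.toList = sc at *
  generalize fr.toList = f at *
  have hlen1 : 1 ≤ f.length := List.length_pos_of_ne_nil hne
  have hinit : [PySem.List.pyGetD f 0 ' '] = f.take 1 := by
    obtain ⟨x, rest, rfl⟩ := List.exists_cons_of_ne_nil hne
    simp [PySem.List.pyGetD_zero_cons]
  have hloop := loopA f sc m (f.length - 1) 1 (by omega) le_rfl hlen1 1
  simp only [Nat.cast_one] at hloop
  rw [hinit, hloop]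
  have hfin : ∀ c : Char, (f ++ [c] = m) ↔
      (m.length = f.length + 1 ∧ f.length ≤ lcpLen (f.zip m) ∧
        PySem.List.pyGetD m (f.length : Int) ' ' = c) := by
    intro c
    rw [final_eq_iff f m c]
    simp [PySem.List.pyGetD_natCast]
  by_cases hcase : m.length = sc.length + 1
  · rw [if_pos hcase,
      PySem.List.foldl_count_if
        (condB f sc (lcpLen (f.zip m)) (lcpLen (sc.reverse.zip m.reverse)) sc.length) _ 1]
    have hcount :
        (PySem.List.pyRange 1 (f.length : Int) 1).countP (condA f sc m)
          = (PySem.List.pyRange 1 (f.length : Int) 1).countP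
              (condB f sc (lcpLen (f.zip m)) (lcpLen (sc.reverse.zip m.reverse)) sc.length) := by
      refine List.countP_congr ?_
      intro i hi
      have := PySem.List.mem_pyRange_one.mp hi
      rw [condA_eq_condB f sc m i this.1 this.2 hle hcase]
    rw [hcount]
    rw [if_congr (hfin _) rfl rfl]
  · rw [if_neg hcase]
    have hzero : (PySem.List.pyRange 1 (f.length : Int) 1).countP (condA f sc m) = 0 := by
      refine List.countP_eq_zero.mpr ?_
      intro i hi hc
      have hmem := PySem.List.mem_pyRange_one.mp hi
      have := (Bool.and_eq_true _ _).mp hc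
      have heq := of_decide_eq_true this.2
      have hnat : (i - 1).toNat = i.toNat - 1 := by omega
      rw [hnat] at heq
      exact hcase ((concat_eq_iff f sc m i.toNat (by omega) (by omega) hle).mp heq).1
    rw [hzero]
    rw [if_congr (hfin _) rfl rfl]
    norm_num
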